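-- pv_equiv track=rewrite | github.com/GsakuL/AdventOfCode | 2015/day05.py | is_nice_1
-- ===== SOURCE A (Python) =====
-- def is_nice_1(word: str):
--     for x in ("ab", "cd", "pq", "xy"):
--         if x in word:
--             return False
--     last = object()
--     double = False
--     vowels_count = 0
--     for char in word:
--         if char in "aeiou":
--             vowels_count += 1
--         if char == last:
--             double = True
--         if double and vowels_count >= 3:
--             return True
--         last = char
--     return False
-- ===== SOURCE B (Python) =====
-- def is_nice_1(word: str):
--     pairs = set(zip(word, word[1:]))
--     if any(bad in pairs for bad in (("a", "b"), ("c", "d"), ("p", "q"), ("x", "y"))):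
--         return False
--     has_double = any(c == d for c, d in pairs)
--     vowels = len([c for c in word if c in "aeiou"])
--     return has_double and vowels >= 3
-- ===== Notes on version B (the rewrite author's own statement) =====
-- stated objective: alternative
-- what changed: Replaces A's substring scans and single stateful early-exit loop (last char, double flag, running vowel count, mid-loop return) by building a bigram index set(zip(word, word[1:])) once: the four forbidden substrings (all length 2) and the double-letter test become set-membership/any queries on that index, and vowels are counted by a filter.
import Mathlib
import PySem

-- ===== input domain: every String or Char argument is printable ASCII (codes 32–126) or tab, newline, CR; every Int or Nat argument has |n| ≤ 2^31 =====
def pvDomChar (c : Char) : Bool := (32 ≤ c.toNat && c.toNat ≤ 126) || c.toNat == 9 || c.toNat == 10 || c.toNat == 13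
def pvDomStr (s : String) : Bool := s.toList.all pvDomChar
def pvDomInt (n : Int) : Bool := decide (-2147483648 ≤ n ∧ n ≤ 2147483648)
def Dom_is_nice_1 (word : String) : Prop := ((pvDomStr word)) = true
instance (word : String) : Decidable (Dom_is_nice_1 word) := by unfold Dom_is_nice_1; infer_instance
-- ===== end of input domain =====

-- B builds a set of adjacent character pairs (a bigram index) once; the forbidden
-- substrings (all of length 2) and the double-letter test become set-membership
-- queries on that index, and vowels are counted by filtering; objective: alternative.

-- ===== PORT A =====
-- A's character loop: state = (last, double, vowels_count), with the mid-loop early return.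
def isNice1Loop (last : Option Char) (double : Bool) (vowels_count : Nat) : List Char → Bool
  | [] => false
  | c :: rest =>
    -- `char in "aeiou"` (membership of a single char in a string)
    let v' := if "aeiou".toList.contains c then vowels_count + 1 else vowels_count
    let d' := if (some c : Option Char) == last then true else double
    if d' && decide (v' ≥ 3) then true
    else isNice1Loop (some c) d' v' rest

-- A's first loop: `for x in ("ab","cd","pq","xy"): if x in word: return False`
def isNice1Bads (word : String) : List String → Bool
  | [] => isNice1Loop none false 0 word.toList
  | x :: rest => if PySem.Str.isIn x word then false else isNice1Bads word rest

def is_nice_1 (word : String) : Bool :=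
  isNice1Bads word ["ab", "cd", "pq", "xy"]

-- ===== PORT B =====
def is_nice_1_alt (word : String) : Bool :=
  let l := word.toList
  -- pairs = set(zip(word, word[1:]))
  let pairs : PySem.Set (Char × Char) := PySem.Set.ofList (l.zip (l.drop 1))
  -- if any(bad in pairs for bad in (("a","b"),("c","d"),("p","q"),("x","y"))): return False
  if [('a', 'b'), ('c', 'd'), ('p', 'q'), ('x', 'y')].any
      (fun bad => PySem.Set.contains pairs bad) then false
  else
    -- has_double = any(c == d for c, d in pairs)
    let has_double := pairs.any (fun p => p.1 == p.2)
    -- vowels = len([c for c in word if c in "aeiou"])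
    let vowels := (l.filter (fun c => "aeiou".toList.contains c)).length
    has_double && decide (vowels ≥ 3)

-- ===== PRECONDITION & SPEC =====
def Spec_is_nice_1 (word : String) (out : Bool) : Prop := out = is_nice_1_alt word
instance (word : String) (out : Bool) : Decidable (Spec_is_nice_1 word out) := by unfold Spec_is_nice_1; infer_instance

-- ===== CLAIM (what is proved, stated in full; the proofs are below) =====
def Claim_equal_is_nice_1 : Prop := ∀ (word : String), Dom_is_nice_1 word → Spec_is_nice_1 word (is_nice_1 word)

-- ===== LEMMAS AND PROOFS =====

-- "a double exists", scanned A-style from an optional previous character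
def pvHasD : Option Char → List Char → Bool
  | _, [] => false
  | last, c :: rest => (((some c : Option Char) == last) || pvHasD (some c) rest)

def pvCnt (l : List Char) : Nat :=
  (l.map (fun c => if "aeiou".toList.contains c then (1 : Nat) else 0)).sum

-- A's early-exit loop on a nonempty list equals the end-of-string conjunction.
theorem loop_eq (cs : List Char) : ∀ (c : Char) (last : Option Char) (d : Bool) (v : Nat),
    isNice1Loop last d v (c :: cs) =
      ((d || pvHasD last (c :: cs)) && decide (v + pvCnt (c :: cs) ≥ 3)) := by
  induction cs with
  | nil =>
    intro c last d v
    simp only [isNice1Loop, pvHasD, pvCnt, List.map_cons, List.map_nil, List.sum_cons,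
      List.sum_nil, Bool.or_false, Nat.add_zero]
    have hvv : (if "aeiou".toList.contains c = true then v + 1 else v) =
        v + (if "aeiou".toList.contains c = true then 1 else 0) := by split <;> omega
    rw [hvv]
    by_cases hb : ((some c : Option Char) == last) = true <;> simp [hb, Bool.or_comm]
  | cons c' rest ih =>
    intro c last d v
    conv_lhs => rw [isNice1Loop]
    rw [ih]
    by_cases h : (((if ((some c : Option Char) == last) = true then true else d) &&
        decide ((if "aeiou".toList.contains c = true then v + 1 else v) ≥ 3)) = true)
    · simp only [h, if_true]
      obtain ⟨hd, hv⟩ := Bool.and_eq_true_iff.mp h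
      have hv' : (if "aeiou".toList.contains c = true then v + 1 else v) ≥ 3 :=
        of_decide_eq_true hv
      have h1 : (d || pvHasD last (c :: c' :: rest)) = true := by
        simp only [pvHasD]
        by_cases hb : ((some c : Option Char) == last) = true
        · simp [hb]
        · simp [hb] at hd; simp [hd]
      have h2 : v + pvCnt (c :: c' :: rest) ≥ 3 := by
        have e1 : pvCnt (c :: c' :: rest) =
            (if "aeiou".toList.contains c = true then 1 else 0) + pvCnt (c' :: rest) := by
          simp [pvCnt]
        rw [e1]
        by_cases hc : ("aeiou".toList.contains c = true)
        · rw [if_pos hc] at hv' ⊢; omega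
        · rw [if_neg hc] at hv' ⊢; omega
      simp [h1, h2]
    · simp only [h, Bool.not_eq_true] at *
      have hlist : pvHasD last (c :: c' :: rest) =
          (((some c : Option Char) == last) || pvHasD (some c) (c' :: rest)) := rfl
      have hcnt : v + pvCnt (c :: c' :: rest) =
          (if "aeiou".toList.contains c = true then v + 1 else v) + pvCnt (c' :: rest) := by
        have e1 : pvCnt (c :: c' :: rest) =
            (if "aeiou".toList.contains c = true then 1 else 0) + pvCnt (c' :: rest) := by
          simp [pvCnt]
        rw [e1]; split <;> omega
      rw [hlist, hcnt]
      by_cases hb : ((some c : Option Char) == last) = true <;>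
        simp [hb, Bool.or_comm, Bool.or_left_comm]

-- a two-character list is an infix exactly when the pair occurs among adjacent pairs
theorem infix_pair (a b : Char) (l : List Char) :
    [a, b] <:+: l ↔ (a, b) ∈ l.zip (l.drop 1) := by
  induction l with
  | nil => simp
  | cons c cs ih =>
    rw [List.infix_cons_iff, ih]
    cases cs with
    | nil =>
      constructor
      · rintro (h | h)
        · have := h.length_le; simp at this
        · simp at h
      · intro h; simp at h
    | cons d ds =>
      simp only [List.drop_one, List.tail_cons, List.zip_cons_cons, List.mem_cons]
      constructor
      · rintro (⟨t, ht⟩ | h)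
        · simp only [List.cons_append, List.cons.injEq] at ht
          obtain ⟨rfl, rfl, _⟩ := ht
          exact Or.inl rfl
        · exact Or.inr (by simpa [List.drop_one] using h)
      · rintro (h | h)
        · rw [Prod.mk.injEq] at h
          obtain ⟨rfl, rfl⟩ := h
          exact Or.inl ⟨ds, rfl⟩
        · exact Or.inr (by simpa [List.drop_one] using h)

-- `bad in pairs` in B equals the corresponding substring test in A
theorem contains_pair_eq_isIn (a b : Char) (word : String) (s : String)
    (hs : s.toList = [a, b]) :
    PySem.Set.contains (PySem.Set.ofList (word.toList.zip (word.toList.drop 1))) (a, b) =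
      PySem.Str.isIn s word := by
  by_cases h : PySem.Str.isIn s word = true
  · rw [h]
    have hinf : s.toList <:+: word.toList := (PySem.Str.isIn_iff_infix _ _).mp h
    rw [hs] at hinf
    have hmem : (a, b) ∈ PySem.Set.ofList (word.toList.zip (word.toList.drop 1)) :=
      (PySem.Set.mem_ofList _ _).mpr ((infix_pair a b word.toList).mp hinf)
    simpa [PySem.Set.contains] using hmem
  · rw [Bool.eq_false_iff.mpr h, ← Bool.not_eq_true]
    intro hc
    apply h
    have hmem : (a, b) ∈ word.toList.zip (word.toList.drop 1) :=
      (PySem.Set.mem_ofList _ _).mp (by simpa [PySem.Set.contains] using hc)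
    exact (PySem.Str.isIn_iff_infix _ _).mpr (hs ▸ (infix_pair a b word.toList).mpr hmem)

-- the A-style double scan equals "some adjacent pair is equal"
theorem hasD_eq_zip (cs : List Char) : ∀ (a : Char),
    pvHasD (some a) cs = ((a :: cs).zip cs).any (fun p => p.1 == p.2) := by
  induction cs with
  | nil => intro a; rfl
  | cons c rest ih =>
    intro a
    have hcomm : ((c : Char) == a) = (a == c) := by
      by_cases h : c = a <;> simp [h, eq_comm]
    simp only [pvHasD, List.zip_cons_cons, List.any_cons, ih c]
    simp [hcomm]

-- `any` over the deduplicated set equals `any` over the underlying list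
theorem any_ofList {α : Type} [BEq α] [LawfulBEq α] (xs : List α) (p : α → Bool) :
    (PySem.Set.ofList xs).any p = xs.any p := by
  by_cases h : xs.any p = true
  · rw [h]
    obtain ⟨x, hx, hp⟩ := List.any_eq_true.mp h
    exact List.any_eq_true.mpr ⟨x, (PySem.Set.mem_ofList _ _).mpr hx, hp⟩
  · rw [Bool.eq_false_iff.mpr h, ← Bool.not_eq_true]
    intro hc
    apply h
    obtain ⟨x, hx, hp⟩ := List.any_eq_true.mp hc
    exact List.any_eq_true.mpr ⟨x, (PySem.Set.mem_ofList _ _).mp hx, hp⟩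

theorem cnt_eq (l : List Char) :
    pvCnt l = (l.filter (fun c => "aeiou".toList.contains c)).length := by
  simpa [pvCnt, List.countP_eq_length_filter] using
    PySem.List.sum_map_ite_one_zero_nat (fun c => "aeiou".toList.contains c) l

theorem is_nice_1_eq_alt (word : String) : is_nice_1 word = is_nice_1_alt word := by
  unfold is_nice_1 is_nice_1_alt
  have hab := contains_pair_eq_isIn 'a' 'b' word "ab" (by decide)
  have hcd := contains_pair_eq_isIn 'c' 'd' word "cd" (by decide)
  have hpq := contains_pair_eq_isIn 'p' 'q' word "pq" (by decide)
  have hxy := contains_pair_eq_isIn 'x' 'y' word "xy" (by decide)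
  simp only [isNice1Bads, List.any_cons, List.any_nil, Bool.or_false, hab, hcd, hpq, hxy]
  by_cases h1 : PySem.Str.isIn "ab" word = true <;>
    by_cases h2 : PySem.Str.isIn "cd" word = true <;>
      by_cases h3 : PySem.Str.isIn "pq" word = true <;>
        by_cases h4 : PySem.Str.isIn "xy" word = true
  all_goals first
    | (simp_all; done)
    | skip
  -- all bad substrings absent: compare A's loop with B's index queries
  rw [Bool.not_eq_true] at h1 h2 h3 h4
  simp only [h1, h2, h3, h4, Bool.false_eq_true, if_false, Bool.or_self, Bool.or_false,
    Bool.false_or, ite_false]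
  rw [any_ofList]
  cases hw : word.toList with
  | nil => simp [isNice1Loop]
  | cons c cs =>
    rw [loop_eq]
    have hnone : pvHasD none (c :: cs) = pvHasD (some c) cs := by
      simp [pvHasD]
    simp only [Bool.false_or, hnone, List.drop_one, List.tail_cons, Nat.zero_add,
      hasD_eq_zip, cnt_eq]

-- ===== VERDICT (by name: the statement is the Claim_ definition above) =====
theorem is_nice_1_spec : Claim_equal_is_nice_1 := by
  intro word _
  unfold Spec_is_nice_1
  exact (is_nice_1_eq_alt word)
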